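-- pv_equiv track=rewrite | github.com/LazarManic/GI-projekat | src/business_logic/heuristics.py | get_jump_vector
-- ===== SOURCE A (Python) =====
-- def get_jump_vector(word:str):
--
--     sol = [1]*(len(word)+1)
--
--     char_dict = {}
--     for i, c in enumerate(word):
--         if c in char_dict:
--             char_dict[c].append(i)
--         else:
--             char_dict[c] = [i]
--
--     for arr in char_dict.values():
--         arr.append('#')
--
--
--     max_jump = 1
--     for i, c in reversed(list(enumerate(word))):
--
--         assert c in char_dict
--         arr = char_dict[c]
--
--         if len(char_dict[c]):
--             next_i = char_dict[c].pop()
--             if next_i == '#':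
--                 jump =  len(word) - i
--             else:
--                 jump = next_i - i
--
--         else:
--             jump = len(word) - i
--
--         if max_jump < jump:
--             max_jump = jump
--
--         sol[i] = max_jump
--
--     return sol
-- ===== SOURCE B (Python) =====
-- def get_jump_vector(word: str):
--     # One right-to-left pass: next_seen[c] = index of next occurrence of c;
--     # jump at i is (next occurrence - i) or (len(word) - i); sol[i] = running max.
--     n = len(word)
--     sol = [1] * (n + 1)
--     next_seen = {}
--     max_jump = 1
--     for i, c in reversed(list(enumerate(word))):
--         jump = (next_seen[c] - i) if c in next_seen else (n - i)
--         max_jump = max(max_jump, jump)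
--         sol[i] = max_jump
--         next_seen[c] = i
--     return sol
-- ===== Notes on version B (the rewrite author's own statement) =====
-- stated objective: simpler
-- what changed: Replaces A's three passes (build per-char position lists, append a '#' sentinel to each, then a reverse scan popping from those lists) by one right-to-left pass that keeps only a dict mapping each char to its next occurrence index, computing each jump directly.
import Mathlib
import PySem

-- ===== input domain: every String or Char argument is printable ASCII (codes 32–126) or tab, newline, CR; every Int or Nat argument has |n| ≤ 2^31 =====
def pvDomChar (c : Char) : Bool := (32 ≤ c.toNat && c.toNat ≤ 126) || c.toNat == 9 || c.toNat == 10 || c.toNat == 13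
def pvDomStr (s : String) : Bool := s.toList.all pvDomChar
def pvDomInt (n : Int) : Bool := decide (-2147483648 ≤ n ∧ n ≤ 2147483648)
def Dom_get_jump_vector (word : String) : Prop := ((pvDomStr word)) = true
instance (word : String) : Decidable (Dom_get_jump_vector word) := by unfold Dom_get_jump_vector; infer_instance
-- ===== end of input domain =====

-- B replaces A's three passes (position lists + '#' sentinel + reverse scan with pop)
-- by a single right-to-left pass keeping only each char's next occurrence index (simpler).

-- ===== PORT A =====
-- Python '#' sentinel inside the heterogeneous int-list is ported as `none`, ints as `some`.
def pvStepA (n : Int) (st : PySem.Dict Char (List (Option Int)) × Int × List Int)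
    (p : Int × Char) : PySem.Dict Char (List (Option Int)) × Int × List Int :=
  let d := st.1; let mj := st.2.1; let sol := st.2.2
  let i := p.1; let c := p.2
  let arr := d.getD c []
  if arr.length ≠ 0 then
    -- next_i = arr.pop()  (pop the last element; the list in the dict shrinks)
    match arr.getLast? with
    | some next_i =>
      let d' := d.insert c arr.dropLast
      let jump := match next_i with
        | none => n - i          -- next_i == '#'
        | some q => q - i
      let mj' := if mj < jump then jump else mj
      (d', mj', sol.set i.toNat mj')
    | none =>  -- unreachable: arr nonempty in this branch
      (d, mj, sol)
  else
    let jump := n - i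
    let mj' := if mj < jump then jump else mj
    (d, mj', sol.set i.toNat mj')

def get_jump_vector (word : String) : List Int :=
  let w := word.toList
  let n : Int := (w.length : Int)
  let sol : List Int := List.replicate (w.length + 1) 1
  -- first loop: char_dict[c] = list of positions of c
  let d0 : PySem.Dict Char (List (Option Int)) :=
    (PySem.List.enumerate w).foldl (fun d p =>
      match d.get? p.2 with
      | some arr => d.insert p.2 (arr ++ [some p.1])
      | none     => d.insert p.2 [some p.1]) PySem.Dict.empty
  -- second loop: arr.append('#') for each value (in-place value mutation = map over values)
  let d1 : PySem.Dict Char (List (Option Int)) :=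
    PySem.Dict.mk (d0.items.map (fun kv => (kv.1, kv.2 ++ [none])))
  -- third loop: for i, c in reversed(list(enumerate(word)))
  (((PySem.List.enumerate w).reverse).foldl (pvStepA n) (d1, 1, sol)).2.2

-- ===== PORT B =====
def pvStepB (n : Int) (st : PySem.Dict Char Int × Int × List Int)
    (p : Int × Char) : PySem.Dict Char Int × Int × List Int :=
  let ns := st.1; let mj := st.2.1; let sol := st.2.2
  let i := p.1; let c := p.2
  let jump := match ns.get? c with
    | some q => q - i
    | none => n - i
  let mj' := max mj jump
  (ns.insert c i, mj', sol.set i.toNat mj')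

def get_jump_vector_alt (word : String) : List Int :=
  let w := word.toList
  let n : Int := (w.length : Int)
  (((PySem.List.enumerate w).reverse).foldl (pvStepB n)
    (PySem.Dict.empty, 1, List.replicate (w.length + 1) 1)).2.2

-- ===== PRECONDITION & SPEC =====
def Spec_get_jump_vector (word : String) (out : List Int) : Prop := out = get_jump_vector_alt word
instance (word : String) (out : List Int) : Decidable (Spec_get_jump_vector word out) := by unfold Spec_get_jump_vector; infer_instance

-- ===== CLAIM (what is proved, stated in full; the proofs are below) =====
def Claim_equal_get_jump_vector : Prop := ∀ (word : String), Dom_get_jump_vector word → Spec_get_jump_vector word (get_jump_vector word)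

-- ===== LEMMAS AND PROOFS =====

-- indices (< k) at which c occurs, as the first loop of A stores them
def pvOcc (w : List Char) (c : Char) (k : Nat) : List Int :=
  ((((PySem.List.enumerate w).take k).filter (fun p => p.2 == c)).map (·.1))

-- invariant linking A's dict of position-lists to B's next-occurrence dict,
-- when positions ≥ k have been processed
def pvInv (w : List Char) (dA : PySem.Dict Char (List (Option Int)))
    (dB : PySem.Dict Char Int) (k : Nat) : Prop :=
  ∀ c : Char, dA.get? c =
    if c ∈ w then some ((pvOcc w c k).map some ++ [dB.get? c]) else none

theorem pvBuild_get (c : Char) (ps : List (Int × Char)) (d : PySem.Dict Char (List (Option Int))) :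
    (ps.foldl (fun d p =>
      match d.get? p.2 with
      | some arr => d.insert p.2 (arr ++ [some p.1])
      | none     => d.insert p.2 [some p.1]) d).get? c =
    match d.get? c with
    | some arr => some (arr ++ ((ps.filter (fun p => p.2 == c)).map (fun p => some p.1)))
    | none => if (ps.filter (fun p => p.2 == c)) = [] then none
              else some ((ps.filter (fun p => p.2 == c)).map (fun p => some p.1)) := by
  induction ps generalizing d with
  | nil => cases h : d.get? c <;> simp [h]
  | cons p ps ih =>
    obtain ⟨pi, pc⟩ := p
    simp only [List.foldl_cons]
    by_cases hpc : pc = c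
    · subst hpc
      simp only [List.filter_cons]
      cases hd : d.get? pc with
      | some arr =>
        rw [ih, PySem.Dict.get?_insert]
        simp [List.append_assoc]
      | none =>
        rw [ih, PySem.Dict.get?_insert]
        simp
    · have hne : ¬ (c = pc) := fun h => hpc h.symm
      rw [List.filter_cons_of_neg (by simp [hpc])]
      cases hd : d.get? pc with
      | some arr =>
        rw [ih, PySem.Dict.get?_insert]
        simp only [hne, if_false]
      | none =>
        rw [ih, PySem.Dict.get?_insert]
        simp only [hne, if_false]

theorem pvHash_get (c : Char) (d : PySem.Dict Char (List (Option Int))) :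
    (PySem.Dict.mk (d.items.map (fun kv => (kv.1, kv.2 ++ [none])))).get? c =
      (d.get? c).map (· ++ [none]) := by
  obtain ⟨l⟩ := d
  induction l with
  | nil => simp [PySem.Dict.get?]
  | cons kv rest ih =>
    obtain ⟨k, v⟩ := kv
    simp only [List.map_cons]
    rw [PySem.Dict.get?_mk_cons, PySem.Dict.get?_mk_cons]
    by_cases hk : (k == c) = true
    · simp [hk]
    · simp only [hk]
      simpa using ih

theorem pvInv_init (w : List Char) :
    pvInv w
      (PySem.Dict.mk
        (((PySem.List.enumerate w).foldl (fun d p =>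
          match d.get? p.2 with
          | some arr => d.insert p.2 (arr ++ [some p.1])
          | none     => d.insert p.2 [some p.1]) PySem.Dict.empty).items.map
            (fun kv => (kv.1, kv.2 ++ [none]))))
      PySem.Dict.empty w.length := by
  intro c
  have htake : (PySem.List.enumerate w).take w.length = PySem.List.enumerate w := by
    apply List.take_of_length_le; simp [PySem.List.length_enumerate]
  have hiff : (PySem.List.enumerate w).filter (fun p => p.2 == c) = [] ↔ c ∉ w := by
    rw [List.filter_eq_nil_iff]
    constructor
    · intro h hc
      rcases List.mem_map.1 (by rw [PySem.List.map_snd_enumerate]; exact hc :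
        c ∈ (PySem.List.enumerate w).map (·.2)) with ⟨p, hp, hpc⟩
      exact absurd (by simp [hpc]) (h p hp)
    · intro h p hp hpc
      exact h (by rw [← PySem.List.map_snd_enumerate w]; exact List.mem_map.2 ⟨p, hp, by simpa using hpc⟩)
  rw [pvHash_get, pvBuild_get]
  simp only [PySem.Dict.get?_empty]
  unfold pvOcc
  rw [htake]
  by_cases hc : c ∈ w
  · rw [if_neg (by simpa [hiff] using hc), if_pos hc]
    simp [List.map_map, Function.comp]
  · rw [if_pos (hiff.2 hc), if_neg hc]
    simp

theorem pvOcc_succ (w : List Char) (c : Char) (k : Nat) (hk : k < w.length) :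
    pvOcc w c (k + 1) = pvOcc w c k ++ (if w[k] == c then [(k : Int)] else []) := by
  unfold pvOcc
  have hgk : (PySem.List.enumerate w)[k]? = some ((k : Int), w[k]) := by
    rw [PySem.List.getElem?_enumerate]
    simp [List.getElem?_eq_getElem hk]
  rw [List.take_add_one, hgk]
  simp only [Option.toList_some, List.filter_append, List.map_append]
  by_cases hc : (w[k] == c) = true
  · simp [hc]
  · simp [hc]

theorem pvIfMax (a b : Int) : (if a < b then b else a) = max a b := by
  rcases lt_or_ge a b with h | h
  · simp [h, max_eq_right h.le]
  · simp [not_lt.2 h, max_eq_left h]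

theorem pvInv_step (w : List Char) (dA : PySem.Dict Char (List (Option Int)))
    (dB : PySem.Dict Char Int) (k : Nat) (hk : k < w.length)
    (hI : pvInv w dA dB (k + 1)) :
    pvInv w (dA.insert w[k] ((pvOcc w w[k] (k + 1)).map some))
      (dB.insert w[k] (k : Int)) k := by
  intro c'
  by_cases hc' : c' = w[k]
  · subst hc'
    rw [PySem.Dict.get?_insert, if_pos rfl, PySem.Dict.get?_insert, if_pos rfl,
      if_pos (List.getElem_mem hk)]
    rw [pvOcc_succ w w[k] k hk]
    simp
  · rw [PySem.Dict.get?_insert, if_neg hc', PySem.Dict.get?_insert, if_neg hc', hI c']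
    by_cases hcw : c' ∈ w
    · rw [if_pos hcw, if_pos hcw]
      rw [pvOcc_succ w c' k hk, if_neg (by simp [Ne.symm hc'] : ¬ (w[k] == c') = true)]
      simp
    · rw [if_neg hcw, if_neg hcw]

theorem pvLoop_eq (w : List Char) (k : Nat) (hk : k ≤ w.length)
    (dA : PySem.Dict Char (List (Option Int))) (dB : PySem.Dict Char Int)
    (mj : Int) (sol : List Int) (hI : pvInv w dA dB k) :
    ((((PySem.List.enumerate w).take k).reverse).foldl (pvStepA (w.length : Int)) (dA, mj, sol)).2
      = ((((PySem.List.enumerate w).take k).reverse).foldl (pvStepB (w.length : Int)) (dB, mj, sol)).2 := by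
  induction k generalizing dA dB mj sol with
  | zero => simp
  | succ k ihk =>
    have hk' : k < w.length := hk
    have htk : (PySem.List.enumerate w).take (k + 1)
        = (PySem.List.enumerate w).take k ++ [((k : Int), w[k])] := by
      rw [List.take_add_one, PySem.List.getElem?_enumerate]
      simp [List.getElem?_eq_getElem hk']
    rw [htk]
    simp only [List.reverse_append, List.reverse_cons, List.reverse_nil, List.nil_append,
      List.cons_append, List.foldl_cons]
    have hcw : w[k] ∈ w := List.getElem_mem hk'
    have harr := hI w[k]
    rw [if_pos hcw] at harr
    have hocc : pvOcc w w[k] (k + 1) = pvOcc w w[k] k ++ [(k : Int)] := by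
      rw [pvOcc_succ w w[k] k hk']; simp
    have harr' : dA.getD w[k] [] = (pvOcc w w[k] (k + 1)).map some ++ [dB.get? w[k]] := by
      rw [PySem.Dict.getD_eq_get?_getD, harr]; rfl
    have hInv' := pvInv_step w dA dB k hk' hI
    rcases hB : dB.get? w[k] with _ | q
    · rw [hB] at harr'
      have hstepA : pvStepA (w.length : Int) (dA, mj, sol) ((k : Int), w[k])
          = (dA.insert w[k] ((pvOcc w w[k] (k + 1)).map some),
             max mj ((w.length : Int) - (k : Int)),
             sol.set k (max mj ((w.length : Int) - (k : Int)))) := by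
        simp [pvStepA, harr', pvIfMax]
      have hstepB : pvStepB (w.length : Int) (dB, mj, sol) ((k : Int), w[k])
          = (dB.insert w[k] (k : Int),
             max mj ((w.length : Int) - (k : Int)),
             sol.set k (max mj ((w.length : Int) - (k : Int)))) := by
        simp [pvStepB, hB]
      rw [hstepA, hstepB]
      exact ihk (Nat.le_of_lt hk') _ _ _ _ hInv'
    · rw [hB] at harr'
      have hstepA : pvStepA (w.length : Int) (dA, mj, sol) ((k : Int), w[k])
          = (dA.insert w[k] ((pvOcc w w[k] (k + 1)).map some),
             max mj (q - (k : Int)),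
             sol.set k (max mj (q - (k : Int)))) := by
        simp [pvStepA, harr', pvIfMax]
      have hstepB : pvStepB (w.length : Int) (dB, mj, sol) ((k : Int), w[k])
          = (dB.insert w[k] (k : Int),
             max mj (q - (k : Int)),
             sol.set k (max mj (q - (k : Int)))) := by
        simp [pvStepB, hB]
      rw [hstepA, hstepB]
      exact ihk (Nat.le_of_lt hk') _ _ _ _ hInv'

-- ===== VERDICT (by name: the statement is the Claim_ definition above) =====
theorem get_jump_vector_spec : Claim_equal_get_jump_vector := by
  intro word _
  unfold Spec_get_jump_vector get_jump_vector get_jump_vector_alt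
  have h := pvLoop_eq word.toList word.toList.length le_rfl _ PySem.Dict.empty 1
    (List.replicate (word.toList.length + 1) 1) (pvInv_init word.toList)
  have hl : (PySem.List.enumerate word.toList).take word.toList.length
      = PySem.List.enumerate word.toList := by
    apply List.take_of_length_le; simp [PySem.List.length_enumerate]
  rw [hl] at h
  simpa using congrArg Prod.snd h
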